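-- pv_equiv track=rewrite | github.com/al-osokin/rueo_global | backend/app/parsing/parser_v2.0_clean.py | count_unescaped_underscores
-- ===== SOURCE A (Python) =====
-- def count_unescaped_underscores(text: str) -> int:
--     """Подсчёт подчёркиваний, не экранированных обратной косой"""
--     count = 0
--     escaped = False
--     for char in text:
--         if escaped:
--             escaped = False
--             continue
--         if char == '\\':
--             escaped = True
--         elif char == '_':
--             count += 1
--     return count
-- ===== SOURCE B (Python) =====
-- import re
--
-- def count_unescaped_underscores(text: str) -> int:
--     """Подсчёт подчёркиваний, не экранированных обратной косой"""
--     return re.sub(r'\\.', '', text, flags=re.S).count('_')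
-- ===== Notes on version B (the rewrite author's own statement) =====
-- stated objective: idiomatic
-- what changed: Replaces the stateful char-by-char escape-flag loop by a transform-then-count decomposition: re.sub(r'\\.', '', text, flags=re.S) deletes every backslash together with the character it escapes, then the cleaned string's underscores are counted with str.count.
import Mathlib
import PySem

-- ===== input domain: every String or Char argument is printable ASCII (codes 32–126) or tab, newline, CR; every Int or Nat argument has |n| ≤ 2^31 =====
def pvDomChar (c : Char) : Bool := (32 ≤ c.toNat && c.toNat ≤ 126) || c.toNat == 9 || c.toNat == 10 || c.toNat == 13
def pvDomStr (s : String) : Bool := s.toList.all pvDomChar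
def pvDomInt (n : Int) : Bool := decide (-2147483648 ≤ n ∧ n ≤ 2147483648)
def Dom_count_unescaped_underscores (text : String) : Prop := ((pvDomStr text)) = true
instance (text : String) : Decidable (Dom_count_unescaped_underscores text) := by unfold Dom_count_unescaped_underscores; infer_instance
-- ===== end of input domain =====

-- B replaces A's stateful escape-flag loop by transform-then-count (delete each backslash with its escaped char, then count '_'); same cost, more idiomatic.

-- ===== PORT A =====
-- loop state: (count, escaped), exactly A's two variables, branches in A's order
def count_unescaped_underscores (text : String) : Int :=
  (text.toList.foldl
    (fun (st : Int × Bool) ch =>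
      if st.2 then (st.1, false)
      else if ch = '\\' then (st.1, true)
      else if ch = '_' then (st.1 + 1, false)
      else (st.1, false))
    (0, false)).1

-- ===== PORT B =====
-- port of re.sub(r'\\.', '', text, flags=re.S): drop each backslash together with
-- the (arbitrary, thanks to DOTALL) character it escapes; a lone trailing backslash stays
def pvRemoveEsc : List Char → List Char
  | [] => []
  | ['\\'] => ['\\']
  | '\\' :: _ :: t => pvRemoveEsc t
  | ch :: t => ch :: pvRemoveEsc t

-- .count('_') on the cleaned string
def count_unescaped_underscores_alt (text : String) : Int :=
  ((pvRemoveEsc text.toList).count '_' : Int)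

-- ===== PRECONDITION & SPEC =====
def Spec_count_unescaped_underscores (text : String) (out : Int) : Prop := out = count_unescaped_underscores_alt text
instance (text : String) (out : Int) : Decidable (Spec_count_unescaped_underscores text out) := by unfold Spec_count_unescaped_underscores; infer_instance

-- ===== CLAIM (what is proved, stated in full; the proofs are below) =====
def Claim_equal_count_unescaped_underscores : Prop := ∀ (text : String), Dom_count_unescaped_underscores text → Spec_count_unescaped_underscores text (count_unescaped_underscores text)

-- ===== LEMMAS AND PROOFS =====
theorem pvLoop_eq : ∀ (l : List Char) (c : Int),
    (l.foldl
      (fun (st : Int × Bool) ch =>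
        if st.2 then (st.1, false)
        else if ch = '\\' then (st.1, true)
        else if ch = '_' then (st.1 + 1, false)
        else (st.1, false))
      (c, false)).1 = c + ((pvRemoveEsc l).count '_' : Int) := by
  intro l
  induction l using pvRemoveEsc.induct with
  | case1 => intro c; simp [pvRemoveEsc]
  | case2 => intro c; simp [pvRemoveEsc, List.foldl]
  | case3 ch t ih =>
      intro c
      simpa [pvRemoveEsc, List.foldl] using ih c
  | case4 ch t hne ih ihr =>
      intro c
      have hns : ch ≠ '\\' := by
        intro e
        cases t with
        | nil => exact hne e rfl
        | cons h' t' => exact ih h' t' e rfl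
      by_cases h : ch = '_'
      · subst h
        simp only [pvRemoveEsc, List.foldl, if_neg (by decide : ('_' : Char) ≠ '\\'),
          Bool.false_eq_true, if_false, if_true]
        rw [ihr (c + 1), List.count_cons]
        simp
        ring
      · simp only [pvRemoveEsc, List.foldl, if_neg hns, if_neg h, Bool.false_eq_true, if_false]
        rw [ihr c]
        rcases t with _ | ⟨h', t'⟩ <;> simp [h]

-- ===== VERDICT (by name: the statement is the Claim_ definition above) =====
theorem count_unescaped_underscores_spec : Claim_equal_count_unescaped_underscores := by
  intro text _
  unfold Spec_count_unescaped_underscores count_unescaped_underscores count_unescaped_underscores_alt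
  simpa using pvLoop_eq text.toList 0
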